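-- pv_equiv track=rewrite | github.com/Sallyrideauto/codetree-TILs | 240906/숫자 등장 횟수/number-frequency.py | cnt_sequence
-- ===== SOURCE A (Python) =====
-- def cnt_sequence(n, m, sequence, queries):
--     cnt_dict = {}   # 각 숫자의 등장 횟수를 저장할 딕셔너리
--     # 수열의 숫자들을 순회하며 딕셔너리를 채우기
--     for num in sequence:
--         if num in cnt_dict:
--             cnt_dict[num] += 1
--         else:
--             cnt_dict[num] = 1
--
--     results = []    # 결과를 저장할 리스트
--     # 주어진 질의에 대해 각 숫자가 몇 번 등장했는지 결과에 추가
--     for query in queries: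
--         # 딕셔너리에 해당 숫자가 있으면 그 값을, 없으면 0을 추가
--         results.append(cnt_dict.get(query, 0))
--
--     return results
-- ===== SOURCE B (Python) =====
-- def cnt_sequence(n, m, sequence, queries):
--     # Sorted copy + binary-search counting (bisect_left/bisect_right written
--     # locally since this module imports nothing): count(q) = right - left.
--     s = sorted(sequence)
--
--     def bisect_left(a, x):
--         lo, hi = 0, len(a)
--         while lo < hi:
--             mid = (lo + hi) // 2
--             if a[mid] < x:
--                 lo = mid + 1
--             else:
--                 hi = mid
--         return lo
--
--     def bisect_right(a, x):
--         lo, hi = 0, len(a)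
--         while lo < hi:
--             mid = (lo + hi) // 2
--             if x < a[mid]:
--                 hi = mid
--             else:
--                 lo = mid + 1
--         return lo
--
--     return [bisect_right(s, q) - bisect_left(s, q) for q in queries]
-- ===== Notes on version B (the rewrite author's own statement) =====
-- stated objective: alternative
-- what changed: Replaces the hash-map frequency dictionary with a sorted copy of the sequence and answers each query by binary search (bisect_right - bisect_left), a different data structure and per-query traversal.
import Mathlib
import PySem

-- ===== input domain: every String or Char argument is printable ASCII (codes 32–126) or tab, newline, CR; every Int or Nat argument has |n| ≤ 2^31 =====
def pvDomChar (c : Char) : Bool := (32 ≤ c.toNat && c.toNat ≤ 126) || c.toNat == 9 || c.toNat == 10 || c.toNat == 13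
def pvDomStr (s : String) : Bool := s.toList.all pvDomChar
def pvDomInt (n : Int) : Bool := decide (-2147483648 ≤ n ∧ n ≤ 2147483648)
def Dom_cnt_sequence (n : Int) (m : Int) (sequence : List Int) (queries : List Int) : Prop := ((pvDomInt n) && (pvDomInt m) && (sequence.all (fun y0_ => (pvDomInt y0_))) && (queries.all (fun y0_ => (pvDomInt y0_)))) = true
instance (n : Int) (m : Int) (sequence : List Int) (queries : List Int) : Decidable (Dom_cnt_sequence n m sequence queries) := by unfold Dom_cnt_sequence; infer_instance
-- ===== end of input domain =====

-- B replaces A's frequency dictionary with a sorted copy of the sequence and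
-- per-query binary-search counting (bisect_right - bisect_left): alternative data structure, same results.
-- ===== PORT A =====
def cnt_sequence (n : Int) (m : Int) (sequence : List Int) (queries : List Int) : List Int :=
  -- cnt_dict = {}; for num in sequence: if num in cnt_dict: cnt_dict[num] += 1 else cnt_dict[num] = 1
  let cnt_dict : PySem.Dict Int Int :=
    sequence.foldl (fun d num =>
      if d.contains num then d.insert num (d.getD num 0 + 1) else d.insert num 1)
      PySem.Dict.empty
  -- results = []; for query in queries: results.append(cnt_dict.get(query, 0))
  queries.foldl (fun results query => results ++ [cnt_dict.getD query 0]) []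

-- ===== PORT B =====
-- Source B's local bisect_left / bisect_right are exactly the stdlib bisect loops,
-- ported as the prelude's PySem.List.bisectLeft / bisectRight.
def cnt_sequence_alt (n : Int) (m : Int) (sequence : List Int) (queries : List Int) : List Int :=
  let s := PySem.List.sorted sequence (fun x => x) false
  queries.map (fun q => ((PySem.List.bisectRight s q : Int) - (PySem.List.bisectLeft s q : Int)))

-- ===== PRECONDITION & SPEC =====
def Spec_cnt_sequence (n : Int) (m : Int) (sequence : List Int) (queries : List Int) (out : List Int) : Prop := out = cnt_sequence_alt n m sequence queries
instance (n : Int) (m : Int) (sequence : List Int) (queries : List Int) (out : List Int) : Decidable (Spec_cnt_sequence n m sequence queries out) := by unfold Spec_cnt_sequence; infer_instance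

-- ===== CLAIM (what is proved, stated in full; the proofs are below) =====
def Claim_equal_cnt_sequence : Prop := ∀ (n : Int) (m : Int) (sequence : List Int) (queries : List Int), Dom_cnt_sequence n m sequence queries → Spec_cnt_sequence n m sequence queries (cnt_sequence n m sequence queries)

-- ===== LEMMAS AND PROOFS =====

-- On a ≤-sorted list, bisect_right - bisect_left is the number of occurrences.
theorem bisect_count (s : List Int) (q : Int)
    (hs : List.Pairwise (fun a b => a ≤ b) s) :
    ((PySem.List.bisectRight s q : Int) - (PySem.List.bisectLeft s q : Int)) = (s.count q : Int) := by
  obtain ⟨hR_le, hRlo, hRhi⟩ := PySem.List.bisectRight_spec s q hs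
  obtain ⟨hL_le, hLlo, hLhi⟩ := PySem.List.bisectLeft_spec s q hs
  set L := PySem.List.bisectLeft s q with hL
  set R := PySem.List.bisectRight s q with hRdef
  have hLR : L ≤ R := by
    by_contra h
    have hRlen : R < s.length := lt_of_lt_of_le (Nat.lt_of_not_le h) hL_le
    exact absurd (hLlo R hRlen (Nat.lt_of_not_le h))
      (not_lt.mpr (le_of_lt (hRhi R hRlen le_rfl)))
  -- split s into three pieces: [0,L), [L,R), [R,len)
  have hsplit : s = s.take L ++ (List.take (R - L) (s.drop L)) ++ s.drop R := by
    have h1 : List.take (R - L) (s.drop L) = List.drop L (s.take R) := (List.drop_take ..).symm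
    have h2 : s.take L = (s.take R).take L := by rw [List.take_take, min_eq_left hLR]
    rw [h1, h2, List.take_append_drop, List.take_append_drop]
  have hcount1 : (s.take L).count q = 0 := by
    rw [List.count_eq_zero]
    intro hq
    obtain ⟨j, hj, hje⟩ := List.mem_iff_getElem.mp hq
    have hjL : j < L := lt_of_lt_of_le hj (by simp)
    have hjlen : j < s.length := lt_of_lt_of_le hjL hL_le
    have := hLlo j hjlen hjL
    rw [List.getElem_take] at hje
    omega
  have hcount3 : (s.drop R).count q = 0 := by
    rw [List.count_eq_zero]
    intro hq
    obtain ⟨j, hj, hje⟩ := List.mem_iff_getElem.mp hq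
    have hjlen : R + j < s.length := by
      have : (s.drop R).length = s.length - R := List.length_drop
      omega
    have := hRhi (R + j) hjlen (Nat.le_add_right _ _)
    rw [List.getElem_drop] at hje
    omega
  have hlen2 : (List.take (R - L) (s.drop L)).length = R - L := by
    rw [List.length_take, List.length_drop]
    omega
  have hcount2 : (List.take (R - L) (s.drop L)).count q = R - L := by
    have hall : List.count q (List.take (R - L) (s.drop L))
        = (List.take (R - L) (s.drop L)).length := by
      rw [List.count_eq_length]
      intro b hb
      obtain ⟨j, hj, hje⟩ := List.mem_iff_getElem.mp hb
      rw [hlen2] at hj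
      have hjlen : L + j < s.length := by omega
      have h1 := hLhi (L + j) hjlen (Nat.le_add_right _ _)
      have h2 := hRlo (L + j) hjlen (by omega)
      rw [List.getElem_take, List.getElem_drop] at hje
      omega
    rw [hall, hlen2]
  have hc : s.count q = R - L := by
    conv_lhs => rw [hsplit]
    rw [List.count_append, List.count_append, hcount1, hcount2, hcount3]
    omega
  omega

-- ===== VERDICT (by name: the statement is the Claim_ definition above) =====
theorem cnt_sequence_spec : Claim_equal_cnt_sequence := by
  intro n m sequence queries _
  unfold Spec_cnt_sequence cnt_sequence cnt_sequence_alt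
  show queries.foldl (fun results query => results ++
        [(sequence.foldl (fun d num =>
            if d.contains num then d.insert num (d.getD num 0 + 1) else d.insert num 1)
            (PySem.Dict.empty : PySem.Dict Int Int)).getD query 0]) []
      = queries.map (fun q =>
          ((PySem.List.bisectRight (PySem.List.sorted sequence (fun x => x) false) q : Int)
            - (PySem.List.bisectLeft (PySem.List.sorted sequence (fun x => x) false) q : Int)))
  -- A's build loop is the standard counter loop (the two branches agree when the key is absent)
  have hstep : sequence.foldl (fun d num =>
      if d.contains num then d.insert num (d.getD num 0 + 1) else d.insert num 1)
      (PySem.Dict.empty : PySem.Dict Int Int)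
      = sequence.foldl (fun d num => d.insert num (d.getD num 0 + 1))
          (PySem.Dict.empty : PySem.Dict Int Int) := by
    apply PySem.List.foldl_congr_mem
    intro d x _
    by_cases h : d.contains x = true
    · simp [h]
    · rw [if_neg (by simp [h]),
        PySem.Dict.getD_of_not_contains d 0 (by simpa using h), zero_add]
  rw [hstep, PySem.List.foldl_append_singleton_eq_map, List.nil_append]
  apply List.map_congr_left
  intro q _
  rw [PySem.Dict.getD_foldl_insert_add_one, PySem.Dict.getD_empty, zero_add,
    bisect_count _ q (PySem.List.sorted_pairwise sequence (fun x => x)),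
    (PySem.List.sorted_perm sequence (fun x => x) false).count_eq q]
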